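-- pv_equiv track=rewrite | github.com/LauritaGutierrez/programa-de-lo-cuantico-a-lo-clasico | experimentos_clasico_cuantico.py | canicas_coeficientes
-- ===== SOURCE A (Python) =====
-- def canicas_coeficientes(matr1, vec1):
--     suma_v = 0
--     matr = [0 for i in range(len(matr1))]
--     for i in range(len(matr1)):
--         for j in range(len(matr1)):
--             for k in range(len(matr1[0])):
--                 suma_v = suma_v + matr1[i][k] * vec1[k]
--             if suma_v == 0:
--                 matr[i] = False ##evalua si esto es falso o no, para poder retornar la matriz
--             else:
--                 matr[i] = True
--     return matr
-- ===== SOURCE B (Python) =====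
-- def canicas_coeficientes(matr1, vec1):
--     """Flag each row: is the running total of the rows' weighted sums
--     (dot products with vec1, over the matrix width) nonzero so far?"""
--     if not matr1:
--         return []
--     m = len(matr1[0])
--     dots = [sum(row[k] * vec1[k] for k in range(m)) for row in matr1]
--     flags = []
--     total = 0
--     for d in dots:
--         total += d
--         flags.append(total != 0)
--     return flags
-- ===== Notes on version B (the rewrite author's own statement) =====
-- stated objective: faster
-- what changed: B computes each row's weighted sum (dot product with vec1 over the matrix width) once and flags the running total in a single pass, instead of A's redundant inner j-loop that recomputes every row's dot product len(matr1) times into an n-scaled cumulative sum; Pre_ excludes only the inputs where A raises IndexError (vec1 or a row shorter than row 0).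
import Mathlib
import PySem

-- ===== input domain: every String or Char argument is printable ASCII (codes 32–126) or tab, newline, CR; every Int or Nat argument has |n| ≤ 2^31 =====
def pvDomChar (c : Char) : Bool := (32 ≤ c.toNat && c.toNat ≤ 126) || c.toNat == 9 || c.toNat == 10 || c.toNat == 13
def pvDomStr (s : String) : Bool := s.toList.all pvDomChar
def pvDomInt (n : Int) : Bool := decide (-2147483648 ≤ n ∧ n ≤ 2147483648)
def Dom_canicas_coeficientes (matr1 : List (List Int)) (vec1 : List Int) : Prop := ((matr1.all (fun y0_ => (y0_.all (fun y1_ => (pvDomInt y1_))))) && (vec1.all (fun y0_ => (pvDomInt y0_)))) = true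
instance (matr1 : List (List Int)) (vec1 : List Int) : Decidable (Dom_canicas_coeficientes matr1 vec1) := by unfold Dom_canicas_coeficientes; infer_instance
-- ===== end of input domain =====

-- B flags each row by the running total of row·vec1 dot products, computing each dot product once
-- (A recomputes every row's dot product len(matr1) times in a redundant inner loop).

-- ===== PORT A =====
-- A's `matr` starts as [0]*n; every cell is overwritten before return (the inner j-loop runs n ≥ 1
-- times whenever row i is processed), so the placeholder is `false` of the result type List Bool.
def canicas_coeficientes (matr1 : List (List Int)) (vec1 : List Int) : List Bool :=
  ((PySem.List.pyRange 0 (matr1.length : Int) 1).foldl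
    (fun (st : Int × List Bool) i =>
      (PySem.List.pyRange 0 (matr1.length : Int) 1).foldl
        (fun (st2 : Int × List Bool) _j =>
          let s := (PySem.List.pyRange 0 ((PySem.List.pyGetD matr1 0 []).length : Int) 1).foldl
            (fun s k => s + PySem.List.pyGetD (PySem.List.pyGetD matr1 i []) k 0 * PySem.List.pyGetD vec1 k 0) st2.1
          (s, st2.2.set i.toNat (if s = 0 then false else true)))
        st)
    ((0 : Int), List.replicate matr1.length false)).2

-- ===== PORT B =====
def canicas_coeficientes_alt (matr1 : List (List Int)) (vec1 : List Int) : List Bool :=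
  match matr1 with
  | [] => []
  | r0 :: _ =>
    let dots := matr1.map (fun row =>
      ((List.range r0.length).map (fun k => row.getD k 0 * vec1.getD k 0)).sum)
    (dots.foldl
      (fun (st : Int × List Bool) d =>
        (st.1 + d, st.2 ++ [decide (st.1 + d ≠ 0)]))
      ((0 : Int), [])).2

-- ===== PRECONDITION & SPEC =====
-- Pre_ excludes exactly the inputs where A raises IndexError: vec1, or some row, shorter than
-- row 0 (A indexes matr1[i][k] and vec1[k] for every k < len(matr1[0])).
def Pre_canicas_coeficientes (matr1 : List (List Int)) (vec1 : List Int) : Prop :=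
  (matr1.headD []).length ≤ vec1.length ∧ ∀ row ∈ matr1, (matr1.headD []).length ≤ row.length
instance (matr1 : List (List Int)) (vec1 : List Int) : Decidable (Pre_canicas_coeficientes matr1 vec1) := by
  unfold Pre_canicas_coeficientes; infer_instance

def pvWitness_canicas_coeficientes : List (List Int) × List Int := ([[1, 2], [0, 1]], [1, 1])

def Spec_canicas_coeficientes (matr1 : List (List Int)) (vec1 : List Int) (out : List Bool) : Prop :=
  out = canicas_coeficientes_alt matr1 vec1
instance (matr1 : List (List Int)) (vec1 : List Int) (out : List Bool) : Decidable (Spec_canicas_coeficientes matr1 vec1 out) := by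
  unfold Spec_canicas_coeficientes; infer_instance

-- ===== CLAIM (what is proved, stated in full; the proofs are below) =====
def Claim_equal_canicas_coeficientes : Prop := ∀ (matr1 : List (List Int)) (vec1 : List Int), Dom_canicas_coeficientes matr1 vec1 → Pre_canicas_coeficientes matr1 vec1 → Spec_canicas_coeficientes matr1 vec1 (canicas_coeficientes matr1 vec1)

-- ===== LEMMAS AND PROOFS =====

-- dot product of the first m0 coordinates
def pvDot (vec1 row : List Int) (m0 : Nat) : Int :=
  ((List.range m0).map (fun k => row.getD k 0 * vec1.getD k 0)).sum

-- cumulative sum of the first t row-dot-products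
def pvP (matr1 : List (List Int)) (vec1 : List Int) (m0 t : Nat) : Int :=
  ((List.range t).map (fun i => pvDot vec1 (matr1.getD i []) m0)).sum

theorem pvP_succ (matr1 : List (List Int)) (vec1 : List Int) (m0 t : Nat) :
    pvP matr1 vec1 m0 (t + 1) = pvP matr1 vec1 m0 t + pvDot vec1 (matr1.getD t []) m0 := by
  simp [pvP, List.range_succ]

theorem pv_set_append_at {α : Type} (l1 l2 : List α) (x : α) (n : Nat) (h : l1.length = n) :
    (l1 ++ l2).set n x = l1 ++ l2.set 0 x := by
  subst h
  induction l1 with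
  | nil => simp
  | cons a l ih => simp [ih]

-- the inner k-loop adds the dot product of the first m0 coordinates
theorem pv_innerK (vec1 row : List Int) (m0 : Nat) (s0 : Int) :
    (PySem.List.pyRange 0 (m0 : Int) 1).foldl
      (fun s k => s + PySem.List.pyGetD row k 0 * PySem.List.pyGetD vec1 k 0) s0
    = s0 + pvDot vec1 row m0 := by
  simp only [PySem.List.pyRange_zero_nat, List.foldl_map, PySem.List.pyGetD_natCast]
  rw [PySem.List.foldl_add]
  rfl

-- the j-loop adds d once per iteration and (re)writes cell i with the flag of the running sum
theorem pv_jloop {α : Type} (d : Int) (i : Nat) :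
    ∀ (l : List α), l ≠ [] → ∀ (s0 : Int) (m : List Bool),
    l.foldl (fun (st2 : Int × List Bool) _ =>
        (st2.1 + d, st2.2.set i (if st2.1 + d = 0 then false else true))) (s0, m)
      = (s0 + l.length * d, m.set i (if s0 + (l.length : Int) * d = 0 then false else true)) := by
  intro l
  induction l with
  | nil => intro h; exact absurd rfl h
  | cons x xs ih =>
    intro _ s0 m
    rcases hxs : xs with _ | ⟨y, ys⟩
    · simp
    · rw [hxs] at ih
      rw [List.foldl_cons, ih (by simp)]
      have h : s0 + d + ((y :: ys).length : Int) * d = s0 + ((x :: y :: ys).length : Int) * d := by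
        push_cast [List.length_cons]; ring
      rw [List.set_set, h]

-- closed form of A's outer loop
theorem pv_outerA (matr1 : List (List Int)) (vec1 : List Int) (hne : matr1 ≠ []) :
    ∀ t, t ≤ matr1.length →
    ((List.range t).map (fun (k : Nat) => (k : Int))).foldl
      (fun (st : Int × List Bool) i =>
        ((List.range matr1.length).map (fun (k : Nat) => (k : Int))).foldl
          (fun (st2 : Int × List Bool) _j =>
            let s := (PySem.List.pyRange 0 ((PySem.List.pyGetD matr1 0 []).length : Int) 1).foldl
              (fun s k => s + PySem.List.pyGetD (PySem.List.pyGetD matr1 i []) k 0 * PySem.List.pyGetD vec1 k 0) st2.1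
            (s, st2.2.set i.toNat (if s = 0 then false else true)))
          st)
      ((0 : Int), List.replicate matr1.length false)
    = ((matr1.length : Int) * pvP matr1 vec1 (matr1.getD 0 []).length t,
       (List.range t).map (fun i =>
         if (matr1.length : Int) * pvP matr1 vec1 (matr1.getD 0 []).length (i + 1) = 0 then false else true)
       ++ List.replicate (matr1.length - t) false) := by
  have hn : 0 < matr1.length := List.length_pos_iff.mpr hne
  have hlr : ((List.range matr1.length).map (fun (k : Nat) => (k : Int))) ≠ [] := by
    apply List.ne_nil_of_length_pos; simpa using hn
  intro t
  induction t with
  | zero => intro _; simp [pvP]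
  | succ t ih =>
    intro ht
    rw [List.range_succ, List.map_append, List.foldl_append, ih (Nat.le_of_succ_le ht)]
    simp only [List.map_cons, List.map_nil, List.foldl_cons, List.foldl_nil]
    simp only [pv_innerK, PySem.List.pyGetD_natCast, PySem.List.pyGetD_ofNat', Int.toNat_natCast]
    rw [pv_jloop _ _ _ hlr]
    have hlen : ((((List.range matr1.length).map (fun (k : Nat) => (k : Int)))).length : Int)
        = (matr1.length : Int) := by simp
    rw [hlen]
    have harith : (matr1.length : Int) * pvP matr1 vec1 (matr1.getD 0 []).length t
        + (matr1.length : Int) * pvDot vec1 (matr1.getD t []) (matr1.getD 0 []).length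
        = (matr1.length : Int) * pvP matr1 vec1 (matr1.getD 0 []).length (t + 1) := by
      rw [pvP_succ]; ring
    rw [harith]
    rw [pv_set_append_at _ _ _ _ (by simp)]
    have hnt : matr1.length - t = (matr1.length - (t + 1)) + 1 := by omega
    rw [hnt, List.replicate_succ, List.set_cons_zero]
    simp

-- closed form of B's single accumulation pass (the row dot products are pvDot by definition)
theorem pv_outerB (vec1 : List Int) (m0 : Nat) (matr1 : List (List Int)) :
    ∀ t, t ≤ matr1.length →
    ((matr1.map (fun row =>
        ((List.range m0).map (fun k => row.getD k 0 * vec1.getD k 0)).sum)).take t).foldl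
      (fun (st : Int × List Bool) d => (st.1 + d, st.2 ++ [decide (st.1 + d ≠ 0)]))
      ((0 : Int), [])
    = (pvP matr1 vec1 m0 t,
       (List.range t).map (fun i => decide (pvP matr1 vec1 m0 (i + 1) ≠ 0))) := by
  intro t
  induction t with
  | zero => intro _; simp [pvP]
  | succ t ih =>
    intro ht
    have htl : t < matr1.length := ht
    have htl' : t < (matr1.map (fun row =>
        ((List.range m0).map (fun k => row.getD k 0 * vec1.getD k 0)).sum)).length := by
      simpa using htl
    rw [List.take_add_one, List.getElem?_eq_getElem htl']
    simp only [Option.toList_some]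
    rw [List.foldl_append, ih (Nat.le_of_succ_le ht)]
    simp only [List.foldl_cons, List.foldl_nil, List.getElem_map]
    have hrow : matr1[t] = matr1.getD t [] := (List.getD_eq_getElem matr1 [] htl).symm
    have hd : ((List.range m0).map (fun k => matr1[t].getD k 0 * vec1.getD k 0)).sum
        = pvDot vec1 (matr1.getD t []) m0 := by
      rw [hrow]; rfl
    rw [hd, ← pvP_succ]
    rw [List.range_succ, List.map_append]
    simp

-- ===== VERDICT (by name: the statement is the Claim_ definition above) =====
theorem canicas_coeficientes_spec : Claim_equal_canicas_coeficientes := by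
  intro matr1 vec1 _ hpre
  unfold Spec_canicas_coeficientes
  cases matr1 with
  | nil => rfl
  | cons r0 rs =>
    have hne : (r0 :: rs) ≠ [] := by simp
    show canicas_coeficientes (r0 :: rs) vec1 = canicas_coeficientes_alt (r0 :: rs) vec1
    rw [canicas_coeficientes, canicas_coeficientes_alt]
    rw [PySem.List.pyRange_zero_nat ((r0 :: rs).length)]
    rw [pv_outerA (r0 :: rs) vec1 hne (r0 :: rs).length le_rfl]
    conv_rhs =>
      rw [show ((r0 :: rs).map (fun row =>
              ((List.range r0.length).map (fun k => row.getD k 0 * vec1.getD k 0)).sum))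
            = ((r0 :: rs).map (fun row =>
              ((List.range r0.length).map (fun k => row.getD k 0 * vec1.getD k 0)).sum)).take (r0 :: rs).length
          from by simp]
    rw [pv_outerB vec1 r0.length (r0 :: rs) ((r0 :: rs).length) le_rfl]
    simp
    intros
    omega
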